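-- pv_equiv track=rewrite | github.com/rshest/advent2022 | python/day05.py | parse_crates
-- ===== SOURCE A (Python) =====
-- def parse_crates(lines):
--     w = int((len(lines[0]) + 1)/4)
--     h = len(lines)
--     tops = [0] * w
--     crates = []
--     for j in range(h):
--         line = lines[j]
--         cline = [' '] * w
--         for i in range(w):
--             c = line[1 + i * 4]
--             cline[i] = c
--             if c == ' ':
--                 tops[i] += 1
--         crates.append(cline)
--     crates.reverse()
--     for i in range(w):
--         tops[i] = h - tops[i]
--     return crates, tops
-- ===== SOURCE B (Python) =====
-- def parse_crates(lines):
--     w = (len(lines[0]) + 1) // 4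
--     h = len(lines)
--     cols = [[line[1 + i * 4] for line in reversed(lines)] for i in range(w)]
--     tops = [sum(1 for c in col if c != ' ') for col in cols]
--     crates = [[col[j] for col in cols] for j in range(h)]
--     return crates, tops
-- ===== Notes on version B (the rewrite author's own statement) =====
-- stated objective: alternative
-- what changed: Replaces A's row-major loop that mutates a preallocated row and per-column space counters in place (then subtracts from the height) by a column-major algorithm: extract each column from the reversed lines, count its non-space crates directly, and transpose the columns back into rows.
import Mathlib
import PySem

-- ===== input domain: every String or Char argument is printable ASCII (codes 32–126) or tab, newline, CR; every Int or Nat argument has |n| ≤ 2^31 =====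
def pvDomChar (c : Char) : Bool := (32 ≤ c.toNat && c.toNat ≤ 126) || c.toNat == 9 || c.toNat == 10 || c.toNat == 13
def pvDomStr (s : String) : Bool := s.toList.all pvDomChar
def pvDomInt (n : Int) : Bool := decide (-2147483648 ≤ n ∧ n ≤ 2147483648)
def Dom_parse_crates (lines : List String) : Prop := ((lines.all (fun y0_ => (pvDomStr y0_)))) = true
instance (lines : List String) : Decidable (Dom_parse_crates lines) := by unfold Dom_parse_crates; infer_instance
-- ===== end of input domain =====

-- B replaces A's row-major loop that mutates preallocated rows and space counters in place by a
-- column-major algorithm: extract each column from the reversed lines, count its non-space crates,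
-- then transpose the columns back into rows; objective: alternative. Return value only.

-- ===== PORT A =====
-- inner loop of A: for i in range(w): c = line[1+i*4]; cline[i] = c; if c == ' ': tops[i] += 1
def pvInnerA (w : Int) (line : String) (tops : List Int) : List String × List Int :=
  (PySem.List.pyRange 0 w 1).foldl
    (fun st i =>
      let c : Char := (PySem.Str.pyGet? line (1 + i * 4)).getD ' '
      (st.1.set i.toNat (String.singleton c),
       if c = ' ' then st.2.set i.toNat (PySem.List.pyGetD st.2 i 0 + 1) else st.2))
    (List.replicate w.toNat " ", tops)

def parse_crates (lines : List String) : List (List String) × List Int :=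
  let w : Int := PySem.Int.truncdiv (PySem.Str.len (PySem.List.pyGetD lines 0 "") + 1) 4  -- int((len+1)/4)
  let h : Int := (lines.length : Int)
  let res :=
    (PySem.List.pyRange 0 h 1).foldl
      (fun st j =>
        let ir := pvInnerA w (PySem.List.pyGetD lines j "") st.1
        (ir.2, st.2 ++ [ir.1]))
      (List.replicate w.toNat 0, ([] : List (List String)))
  let crates := res.2.reverse
  let tops :=
    (PySem.List.pyRange 0 w 1).foldl
      (fun t i => t.set i.toNat (h - PySem.List.pyGetD t i 0)) res.1
  (crates, tops)

-- ===== PORT B =====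
def parse_crates_alt (lines : List String) : List (List String) × List Int :=
  let w : Int := PySem.Int.floordiv (PySem.Str.len (PySem.List.pyGetD lines 0 "") + 1) 4  -- (len+1)//4
  let h : Int := (lines.length : Int)
  let cols :=
    (PySem.List.pyRange 0 w 1).map (fun i =>
      lines.reverse.map (fun line => String.singleton ((PySem.Str.pyGet? line (1 + i * 4)).getD ' ')))
  let tops := cols.map (fun col => (col.countP (fun c => c != " ") : Int))
  let crates :=
    (PySem.List.pyRange 0 h 1).map (fun j => cols.map (fun col => PySem.List.pyGetD col j " "))
  (crates, tops)

-- ===== PRECONDITION & SPEC =====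
-- Pre_ excludes exactly the inputs on which the Python A raises IndexError: an empty list of
-- lines (lines[0]), or some line too short for the column accesses line[1+4*i], i < w.
def Pre_parse_crates (lines : List String) : Prop :=
  lines ≠ [] ∧
  ∀ l ∈ lines,
    (PySem.Str.len (lines.headD "") + 1) / 4 = 0 ∨
      4 * ((PySem.Str.len (lines.headD "") + 1) / 4) - 2 ≤ PySem.Str.len l
instance (lines : List String) : Decidable (Pre_parse_crates lines) := by
  unfold Pre_parse_crates; infer_instance

def pvWitness_parse_crates : List String := ["[A] [B]"]

def Spec_parse_crates (lines : List String) (out : List (List String) × List Int) : Prop := out = parse_crates_alt lines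
instance (lines : List String) (out : List (List String) × List Int) : Decidable (Spec_parse_crates lines out) := by unfold Spec_parse_crates; infer_instance

-- ===== CLAIM (what is proved, stated in full; the proofs are below) =====
def Claim_equal_parse_crates : Prop := ∀ (lines : List String), Dom_parse_crates lines → Pre_parse_crates lines → Spec_parse_crates lines (parse_crates lines)

-- ===== LEMMAS AND PROOFS =====

-- the character both programs read at column k of a line (default ' ' is never used inside Pre_)
def pvCh (line : String) (k : Nat) : Char :=
  (PySem.Str.pyGet? line (1 + (k : Int) * 4)).getD ' '

-- the row of singleton strings both programs build from one crate line
def pvRow (W : Nat) (line : String) : List String :=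
  (List.range W).map (fun k => String.singleton (pvCh line k))

theorem pvGetD_set_eq {α : Type} (l : List α) (i : Nat) (x d : α) (h : i < l.length) :
    (l.set i x).getD i d = x := by
  simp [List.getD, h]

theorem pvGetD_set_ne {α : Type} (l : List α) (i j : Nat) (x d : α) (h : j ≠ i) :
    (l.set i x).getD j d = l.getD j d := by
  simp [List.getD, List.getElem?_set_ne (Ne.symm h)]

-- pointwise description of a left-to-right fold that rewrites slot i at step i
theorem pvFoldSet {α : Type} (d : α) (step : List α → Nat → List α) (u : Nat → α → α)
    (hlen : ∀ t i, i < t.length → (step t i).length = t.length)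
    (hget : ∀ t (i j : Nat), i < t.length →
      (step t i).getD j d = if j = i then u i (t.getD i d) else t.getD j d) :
    ∀ (n a : Nat) (t : List α), a + n ≤ t.length →
      ((List.range' a n).foldl step t).length = t.length ∧
      ∀ j : Nat, ((List.range' a n).foldl step t).getD j d =
        if a ≤ j ∧ j < a + n then u j (t.getD j d) else t.getD j d := by
  intro n
  induction n with
  | zero =>
      intro a t _
      refine ⟨rfl, ?_⟩
      intro j
      simp
  | succ n ih =>
      intro a t hb
      have ha : a < t.length := by omega
      have hlen' : (step t a).length = t.length := hlen t a ha
      have hb' : (a + 1) + n ≤ (step t a).length := by omega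
      obtain ⟨ihlen, ihget⟩ := ih (a + 1) (step t a) hb'
      rw [List.range'_succ]
      refine ⟨by simp [List.foldl_cons, ihlen, hlen'], ?_⟩
      intro j
      rw [List.foldl_cons, ihget j, hget t a j ha]
      by_cases h1 : j = a
      · subst h1
        have h2 : ¬ (j + 1 ≤ j ∧ j < j + 1 + n) := by omega
        have h3 : j ≤ j ∧ j < j + (n + 1) := by omega
        simp [h3]
      · split_ifs <;> first | rfl | omega

theorem pvEqMap {α : Type} (d : α) (l : List α) (W : Nat) (f : Nat → α)
    (hlen : l.length = W) (hget : ∀ j, j < W → l.getD j d = f j) :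
    l = (List.range W).map f := by
  apply List.ext_getElem (by simp [hlen])
  intro i h1 h2
  have hi : i < W := by simpa [hlen] using h1
  have hg := hget i hi
  rw [List.getD_eq_getElem l d h1] at hg
  simp [hg]

theorem pvSingNe (c : Char) (hc : ¬ c = ' ') : ¬ String.singleton c = " " := by
  intro h
  apply hc
  have h2 : (String.singleton c).toList = (" " : String).toList := by rw [h]
  simpa [String.singleton] using h2

theorem pvSingBeq (c : Char) : (String.singleton c != " ") = !(c == ' ') := by
  by_cases hc : c = ' '
  · subst hc; rfl
  · have h1 : (String.singleton c == " ") = false := by simpa using pvSingNe c hc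
    have h2 : (c == ' ') = false := by simpa using hc
    simp [bne, h1, h2]

-- characterization of A's inner loop (one line): the row it builds and the per-column update
theorem pvInnerA_eq (W : Nat) (line : String) (tops : List Int) (h : tops.length = W) :
    pvInnerA (W : Int) line tops =
      (pvRow W line,
       (List.range W).map (fun k =>
         if pvCh line k = ' ' then tops.getD k 0 + 1 else tops.getD k 0)) := by
  unfold pvInnerA pvRow
  rw [PySem.List.pyRange_zero_natCast, List.foldl_map]
  simp only [Int.toNat_natCast, PySem.List.pyGetD_natCast]
  rw [PySem.List.foldl_prod_mk
    (f := fun (cl : List String) (k : Nat) => cl.set k (String.singleton ((PySem.Str.pyGet? line (1 + (k : Int) * 4)).getD ' ')))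
    (g := fun (t : List Int) (k : Nat) => if ((PySem.Str.pyGet? line (1 + (k : Int) * 4)).getD ' ') = ' '
            then t.set k (t.getD k 0 + 1) else t)]
  rw [Prod.mk.injEq]
  constructor
  · conv_lhs => rw [List.range_eq_range']
    obtain ⟨hl, hg⟩ := pvFoldSet " "
      (fun cl k => cl.set k (String.singleton ((PySem.Str.pyGet? line (1 + (k : Int) * 4)).getD ' ')))
      (fun k _ => String.singleton ((PySem.Str.pyGet? line (1 + (k : Int) * 4)).getD ' '))
      (fun t i hi => by simp)
      (fun t i j hi => by
        by_cases hj : j = i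
        · subst hj; rw [pvGetD_set_eq _ _ _ _ hi, if_pos rfl]
        · rw [pvGetD_set_ne _ _ _ _ _ hj, if_neg hj])
      W 0 (List.replicate W " ") (by simp)
    refine pvEqMap " " _ W _ (by rw [hl]; exact List.length_replicate) ?_
    intro j hj
    rw [hg j, if_pos (show 0 ≤ j ∧ j < 0 + W by omega)]
    simp [pvCh]
  · conv_lhs => rw [List.range_eq_range']
    obtain ⟨hl, hg⟩ := pvFoldSet 0
      (fun t k => if ((PySem.Str.pyGet? line (1 + (k : Int) * 4)).getD ' ') = ' '
          then t.set k (t.getD k 0 + 1) else t)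
      (fun k x => if ((PySem.Str.pyGet? line (1 + (k : Int) * 4)).getD ' ') = ' ' then x + 1 else x)
      (fun t i hi => by dsimp only; split_ifs <;> simp)
      (fun t i j hi => by
        dsimp only
        split_ifs with hc hj hj
        · subst hj; rw [pvGetD_set_eq _ _ _ _ hi]
        · rw [pvGetD_set_ne _ _ _ _ _ hj]
        · subst hj; rfl
        · rfl)
      W 0 tops (by omega)
    refine pvEqMap 0 _ W _ (by rw [hl, h]) ?_
    intro j hj
    rw [hg j, if_pos (show 0 ≤ j ∧ j < 0 + W by omega)]
    simp [pvCh]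

-- A's outer loop over the lines: tops accumulates per-column space counts, crates the rows
theorem pvOuterA (W : Nat) : ∀ (ls : List String) (t : List Int) (acc : List (List String)),
    t.length = W →
    ls.foldl (fun st line =>
        ((pvInnerA (W : Int) line st.1).2, st.2 ++ [(pvInnerA (W : Int) line st.1).1])) (t, acc) =
      ((List.range W).map (fun k => t.getD k 0 + (ls.countP (fun line => pvCh line k == ' ') : Int)),
       acc ++ ls.map (pvRow W)) := by
  intro ls
  induction ls with
  | nil =>
      intro t acc h
      simp only [List.foldl_nil, List.countP_nil, List.map_nil, List.append_nil]
      rw [Prod.mk.injEq]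
      refine ⟨?_, rfl⟩
      exact pvEqMap 0 t W _ h (fun j hj => by simp)
  | cons line ls ih =>
      intro t acc h
      rw [List.foldl_cons, pvInnerA_eq W line t h]
      rw [ih _ _ (by simp)]
      rw [Prod.mk.injEq]
      constructor
      · apply List.map_congr_left
        intro k hk
        have hkW : k < W := List.mem_range.mp hk
        rw [PySem.List.getD_map_range _ _ _ _ hkW, List.countP_cons]
        by_cases hsp : pvCh line k = ' ' <;> simp [hsp]; ring
      · simp

-- the common width of the grid, as a Nat
def pvW (lines : List String) : Nat := ((lines.headD "").toList.length + 1) / 4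

-- A's result in closed form
theorem parse_crates_A_eq (lines : List String) (hne : lines ≠ []) :
    parse_crates lines =
      (lines.reverse.map (pvRow (pvW lines)),
       (List.range (pvW lines)).map (fun k =>
         ((lines.countP (fun line => !(pvCh line k == ' ')) : Nat) : Int))) := by
  have h0 : PySem.List.pyGetD lines 0 "" = lines.headD "" := by
    cases lines with
    | nil => exact absurd rfl hne
    | cons a l => simp [pysem]
  have hcast : PySem.Str.len (lines.headD "") + 1
      = (((lines.headD "").toList.length + 1 : Nat) : Int) := by push_cast; simp
  have hwA : PySem.Int.truncdiv (PySem.Str.len (lines.headD "") + 1) 4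
      = ((pvW lines : Nat) : Int) := by
    unfold pvW
    rw [PySem.Int.truncdiv, hcast, Int.tdiv_eq_ediv]
    omega
  set W : Nat := pvW lines with hW
  simp only [parse_crates, h0, hwA, Int.toNat_natCast]
  rw [PySem.List.foldl_pyRange_zero_pyGetD' lines ""
      (fun (st : List Int × List (List String)) (line : String) =>
        ((pvInnerA (W : Int) line st.1).2, st.2 ++ [(pvInnerA (W : Int) line st.1).1]))
      ((List.replicate W 0 : List Int), ([] : List (List String)))]
  rw [pvOuterA W lines (List.replicate W 0) [] List.length_replicate]
  rw [Prod.mk.injEq]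
  constructor
  · simp [List.map_reverse]
  · dsimp only
    conv_lhs => rw [PySem.List.pyRange_zero_natCast, List.foldl_map]
    simp only [Int.toNat_natCast, PySem.List.pyGetD_natCast]
    conv_lhs => rw [List.range_eq_range']
    obtain ⟨hl, hg⟩ := pvFoldSet 0
      (fun t k => t.set k ((lines.length : Int) - t.getD k 0))
      (fun k x => (lines.length : Int) - x)
      (fun t i hi => by simp)
      (fun t i j hi => by
        dsimp only
        by_cases hj : j = i
        · subst hj; rw [pvGetD_set_eq _ _ _ _ hi, if_pos rfl]
        · rw [pvGetD_set_ne _ _ _ _ _ hj, if_neg hj])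
      W 0 (List.map (fun k => (List.replicate W (0 : Int)).getD k 0
            + ((List.countP (fun line => pvCh line k == ' ') lines : Nat) : Int)) (List.range' 0 W))
      (by simp)
    refine pvEqMap 0 _ W _ (by rw [hl]; simp) ?_
    intro j hj
    rw [hg j, if_pos (show 0 ≤ j ∧ j < 0 + W by omega)]
    rw [← List.range_eq_range', PySem.List.getD_map_range _ _ _ _ hj]
    have hsum : List.countP (fun line => pvCh line j == ' ') lines
        + List.countP (fun line => !(pvCh line j == ' ')) lines = lines.length := by
      simpa using (List.length_eq_countP_add_countP
        (l := lines) (p := fun line => pvCh line j == ' ')).symm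
    have hrep : (List.replicate W (0 : Int)).getD j 0 = 0 := by simp
    rw [hrep]
    omega

-- B's result in closed form (columns built over reversed lines, counted, then transposed)
theorem parse_crates_alt_eq (lines : List String) (hne : lines ≠ []) :
    parse_crates_alt lines =
      (lines.reverse.map (pvRow (pvW lines)),
       (List.range (pvW lines)).map (fun k =>
         ((lines.countP (fun line => !(pvCh line k == ' ')) : Nat) : Int))) := by
  have h0 : PySem.List.pyGetD lines 0 "" = lines.headD "" := by
    cases lines with
    | nil => exact absurd rfl hne
    | cons a l => simp [pysem]
  have hcast : PySem.Str.len (lines.headD "") + 1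
      = (((lines.headD "").toList.length + 1 : Nat) : Int) := by push_cast; simp
  have hwB : PySem.Int.floordiv (PySem.Str.len (lines.headD "") + 1) 4
      = ((pvW lines : Nat) : Int) := by
    rw [hcast]
    exact_mod_cast PySem.Int.floordiv_natCast _ 4
  set W : Nat := pvW lines with hW
  simp only [parse_crates_alt, h0, hwB]
  rw [PySem.List.pyRange_zero_natCast, PySem.List.pyRange_zero_natCast (n := lines.length)]
  rw [Prod.mk.injEq]
  constructor
  · -- the transpose of the columns is the reversed grid
    apply List.ext_getElem (by simp)
    intro j h1 h2
    simp only [List.getElem_map, List.getElem_range]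
    rw [List.map_map, List.map_map]
    unfold pvRow
    apply List.map_congr_left
    intro k hk
    simp only [Function.comp_apply, PySem.List.pyGetD_natCast]
    have hj : j < lines.reverse.length := by simpa using h2
    rw [List.getD_eq_getElem _ _ (by simpa using hj), List.getElem_map]
    rfl
  · -- the per-column counts
    rw [List.map_map, List.map_map]
    apply List.map_congr_left
    intro k hk
    simp only [Function.comp_apply]
    rw [List.countP_map, List.countP_reverse]
    congr 1
    apply List.countP_congr
    intro line _
    simp only [Function.comp_apply]
    rw [pvSingBeq]
    rfl

-- ===== VERDICT (by name: the statement is the Claim_ definition above) =====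
theorem parse_crates_spec : Claim_equal_parse_crates := by
  intro lines _ hpre
  unfold Spec_parse_crates
  rw [parse_crates_A_eq lines hpre.1, parse_crates_alt_eq lines hpre.1]
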